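-- pv_equiv track=rewrite | github.com/gideongrinberg/gce | generate_tables.py | relevance_mask
-- ===== SOURCE A (Python) =====
-- def relevance_mask(sq: int) -> int:
--     bb = 0
--     rank = sq // 8
--     file = sq % 8
--
--     r, f = rank + 1, file + 1
--     while r < 7 and f < 7:
--         bb |= 1 << (r * 8 + f)
--         r += 1
--         f += 1
--
--     r, f = rank + 1, file - 1
--     while r < 7 and f > 0:
--         bb |= 1 << (r * 8 + f)
--         r += 1
--         f -= 1
--
--     r, f = rank - 1, file + 1
--     while r > 0 and f < 7:
--         bb |= 1 << (r * 8 + f)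
--         r -= 1
--         f += 1
--
--     r, f = rank - 1, file - 1
--     while r > 0 and f > 0:
--         bb |= 1 << (r * 8 + f)
--         r -= 1
--         f -= 1
--
--     return bb
-- ===== SOURCE B (Python) =====
-- def relevance_mask(sq: int) -> int:
--     # Closed form: each of the four diagonal rays is a geometric series of bits.
--     rank, file = divmod(sq, 8)
--     bb = 0
--     for step, K in (
--         (9, min(6 - rank, 6 - file)),
--         (7, min(6 - rank, file - 1)),
--         (-7, min(rank - 1, 6 - file)),
--         (-9, min(rank - 1, file - 1)),
--     ):
--         if K >= 1:
--             d = -step if step < 0 else step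
--             lo = sq + (step if step > 0 else step * K)
--             bb += (((1 << (d * K)) - 1) // ((1 << d) - 1)) << lo
--     return bb
-- ===== Notes on version B (the rewrite author's own statement) =====
-- stated objective: alternative
-- what changed: Replaced the four bit-by-bit diagonal ray walks by a closed form: each ray's bits form a geometric series, computed with one shift/divide expression per ray, accumulated by addition (the rays are disjoint).
-- outside the precondition, e.g. on relevance_mask(-9): A raises ValueError, B raises ValueError
import Mathlib
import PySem

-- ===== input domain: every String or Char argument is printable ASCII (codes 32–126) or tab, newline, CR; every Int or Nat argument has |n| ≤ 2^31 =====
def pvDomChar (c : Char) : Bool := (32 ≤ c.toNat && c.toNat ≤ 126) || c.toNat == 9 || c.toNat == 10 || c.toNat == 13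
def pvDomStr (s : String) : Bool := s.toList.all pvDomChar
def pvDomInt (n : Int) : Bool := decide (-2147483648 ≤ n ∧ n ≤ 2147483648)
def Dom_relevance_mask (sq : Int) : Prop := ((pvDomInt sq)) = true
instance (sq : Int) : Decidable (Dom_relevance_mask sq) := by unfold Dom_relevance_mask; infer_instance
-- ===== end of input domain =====

-- B replaces A's four bit-by-bit diagonal ray walks by a closed-form geometric series per ray (objective: alternative).

-- ===== PORT A =====
-- Each while loop moves the file index monotonically within 0..7, so it runs at most 7
-- iterations: fuel 8 makes the same computation total without changing the computation.
-- '1 << (r*8+f)' is ported as '(1 : Int) <<< (r*8+f).toNat'; on Pre_ (sq ≥ -8) every shift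
-- amount that is reached is nonnegative, so .toNat is exact there (Python raises otherwise).
def pvLoopNE : Nat → Int → Int → Int → Int
  | 0, _, _, bb => bb
  | n + 1, r, f, bb =>
    if r < 7 ∧ f < 7 then pvLoopNE n (r + 1) (f + 1) (Int.lor bb ((1 : Int) <<< (r * 8 + f).toNat)) else bb

def pvLoopNW : Nat → Int → Int → Int → Int
  | 0, _, _, bb => bb
  | n + 1, r, f, bb =>
    if r < 7 ∧ f > 0 then pvLoopNW n (r + 1) (f - 1) (Int.lor bb ((1 : Int) <<< (r * 8 + f).toNat)) else bb

def pvLoopSE : Nat → Int → Int → Int → Int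
  | 0, _, _, bb => bb
  | n + 1, r, f, bb =>
    if r > 0 ∧ f < 7 then pvLoopSE n (r - 1) (f + 1) (Int.lor bb ((1 : Int) <<< (r * 8 + f).toNat)) else bb

def pvLoopSW : Nat → Int → Int → Int → Int
  | 0, _, _, bb => bb
  | n + 1, r, f, bb =>
    if r > 0 ∧ f > 0 then pvLoopSW n (r - 1) (f - 1) (Int.lor bb ((1 : Int) <<< (r * 8 + f).toNat)) else bb

def relevance_mask (sq : Int) : Int :=
  let rank := PySem.Int.floordiv sq 8
  let file := PySem.Int.mod sq 8
  let bb := pvLoopNE 8 (rank + 1) (file + 1) 0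
  let bb := pvLoopNW 8 (rank + 1) (file - 1) bb
  let bb := pvLoopSE 8 (rank - 1) (file + 1) bb
  pvLoopSW 8 (rank - 1) (file - 1) bb

-- ===== PORT B =====
-- Transliteration of Source B: one fold over the four (step, K) ray descriptors; each admitted
-- ray contributes its bits as one closed-form geometric sum. '.toNat' on the shift amounts is
-- exact on Pre_ (d*K ≥ 0 whenever K ≥ 1, and lo ≥ 0 for sq ≥ -8; Python raises otherwise).
def relevance_mask_alt (sq : Int) : Int :=
  let rank := PySem.Int.floordiv sq 8
  let file := PySem.Int.mod sq 8
  [((9 : Int), min (6 - rank) (6 - file)),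
   ((7 : Int), min (6 - rank) (file - 1)),
   ((-7 : Int), min (rank - 1) (6 - file)),
   ((-9 : Int), min (rank - 1) (file - 1))].foldl
    (fun (bb : Int) (sk : Int × Int) =>
      if 1 ≤ sk.2 then
        let d : Int := if sk.1 < 0 then -sk.1 else sk.1
        let lo : Int := sq + (if 0 < sk.1 then sk.1 else sk.1 * sk.2)
        bb + (PySem.Int.floordiv (((1 : Int) <<< (d * sk.2).toNat) - 1) (((1 : Int) <<< d.toNat) - 1)) <<< lo.toNat
      else bb) 0

-- ===== PRECONDITION & SPEC =====
-- Pre_ excludes exactly sq ≤ -9, where A raises ValueError (a ray walk reaches a negative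
-- shift amount); A returns normally on every sq ≥ -8.
def Pre_relevance_mask (sq : Int) : Prop := -8 ≤ sq
instance (sq : Int) : Decidable (Pre_relevance_mask sq) := by unfold Pre_relevance_mask; infer_instance
def pvWitness_relevance_mask : Int := (27)

def Spec_relevance_mask (sq : Int) (out : Int) : Prop := out = relevance_mask_alt sq
instance (sq : Int) (out : Int) : Decidable (Spec_relevance_mask sq out) := by unfold Spec_relevance_mask; infer_instance

-- ===== CLAIM (what is proved, stated in full; the proofs are below) =====
def Claim_equal_relevance_mask : Prop := ∀ (sq : Int), Dom_relevance_mask sq → Pre_relevance_mask sq → Spec_relevance_mask sq (relevance_mask sq)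

-- ===== LEMMAS AND PROOFS =====

-- Proof-side helpers: the value one ray descriptor contributes in B.
def pvTerm (sq step K : Int) : Int :=
  if 1 ≤ K then
    let d : Int := if step < 0 then -step else step
    let lo : Int := sq + (if 0 < step then step else step * K)
    (PySem.Int.floordiv (((1 : Int) <<< (d * K).toNat) - 1) (((1 : Int) <<< d.toNat) - 1)) <<< lo.toNat
  else 0

theorem pvlor_cast (a b : Nat) : Int.lor (a : Int) (b : Int) = ((a ||| b : Nat) : Int) := rfl

theorem pvone_shift_cast (t : Nat) : ((1 : Int) <<< t) = ((1 <<< t : Nat) : Int) := by simp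

theorem pvNat_mul_lor (m p : Nat) : 256 * (m ||| 1 <<< p) = (256 * m) ||| 1 <<< (p + 8) := by
  have h1 : (m ||| 1 <<< p) <<< 8 = (m <<< 8) ||| ((1 <<< p) <<< 8) := Nat.shiftLeft_or_distrib ..
  have h2 : ∀ a : Nat, a <<< 8 = 256 * a := by intro a; rw [Nat.shiftLeft_eq]; ring
  have h3 : (1 : Nat) <<< (p + 8) = (1 <<< p) <<< 8 := by rw [Nat.shiftLeft_add]
  rw [h3, ← h2, ← h2, h1, h2]

-- Base: A = B on every square sq ∈ [-8, 87].
set_option maxHeartbeats 4000000 in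
theorem pv_base : ∀ n ∈ Finset.range 96, relevance_mask ((n : Int) - 8) = relevance_mask_alt ((n : Int) - 8) := by
  decide

theorem pvLoopNE_stop (n : Nat) (r f bb : Int) (h : 7 ≤ r) : pvLoopNE (n + 1) r f bb = bb := by
  rw [pvLoopNE, if_neg (fun hc => absurd hc.1 (by omega))]

theorem pvLoopNW_stop (n : Nat) (r f bb : Int) (h : 7 ≤ r) : pvLoopNW (n + 1) r f bb = bb := by
  rw [pvLoopNW, if_neg (fun hc => absurd hc.1 (by omega))]

-- The south-east loop started on a cast accumulator stays a cast.
theorem pvLoopSE_cast (n : Nat) : ∀ (r f : Int) (m : Nat), ∃ m' : Nat, pvLoopSE n r f (m : Int) = (m' : Int) := by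
  induction n with
  | zero => intro r f m; exact ⟨m, rfl⟩
  | succ n ih =>
    intro r f m
    by_cases h : r > 0 ∧ f < 7
    · have hc : Int.lor (m : Int) ((1 : Int) <<< (r * 8 + f).toNat) =
          ((m ||| 1 <<< (r * 8 + f).toNat : Nat) : Int) := by
        rw [pvone_shift_cast, pvlor_cast]
      obtain ⟨m', hm'⟩ := ih (r - 1) (f + 1) (m ||| 1 <<< (r * 8 + f).toNat)
      exact ⟨m', by rw [pvLoopSE, if_pos h, hc, hm']⟩
    · exact ⟨m, by rw [pvLoopSE, if_neg h]⟩

-- Shifting the start rank up by one multiplies the south-east ray by 2^8,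
-- provided the rank stays strictly positive throughout (n < r).
theorem pvLoopSE_shift (n : Nat) : ∀ (r f : Int) (m : Nat), (n : Int) < r → 0 ≤ f →
    pvLoopSE n r f ((256 * m : Nat) : Int) = 256 * pvLoopSE n (r - 1) f (m : Int) := by
  induction n with
  | zero => intro r f m _ _; rw [pvLoopSE, pvLoopSE]; push_cast; ring
  | succ n ih =>
    intro r f m hr hf
    by_cases h : f < 7
    · rw [pvLoopSE, pvLoopSE, if_pos ⟨by omega, h⟩, if_pos ⟨by omega, h⟩]
      have hp : ((r - 1) * 8 + f).toNat + 8 = (r * 8 + f).toNat := by omega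
      have hacc1 : Int.lor ((256 * m : Nat) : Int) ((1 : Int) <<< (r * 8 + f).toNat) =
          ((256 * (m ||| 1 <<< ((r - 1) * 8 + f).toNat) : Nat) : Int) := by
        rw [pvone_shift_cast, pvlor_cast, pvNat_mul_lor, hp]
      have hacc2 : Int.lor (m : Int) ((1 : Int) <<< ((r - 1) * 8 + f).toNat) =
          (((m ||| 1 <<< ((r - 1) * 8 + f).toNat) : Nat) : Int) := by
        rw [pvone_shift_cast, pvlor_cast]
      rw [hacc1, hacc2, ih (r - 1) (f + 1) _ (by omega) (by omega)]
    · rw [pvLoopSE, pvLoopSE, if_neg (fun hc => absurd hc.2 h), if_neg (fun hc => absurd hc.2 h)]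
      push_cast; ring

-- Same fact for the south-west ray (the file guard keeps every reached position nonnegative).
theorem pvLoopSW_shift (n : Nat) : ∀ (r f : Int) (m : Nat), (n : Int) < r →
    pvLoopSW n r f ((256 * m : Nat) : Int) = 256 * pvLoopSW n (r - 1) f (m : Int) := by
  induction n with
  | zero => intro r f m _; rw [pvLoopSW, pvLoopSW]; push_cast; ring
  | succ n ih =>
    intro r f m hr
    by_cases h : 0 < f
    · rw [pvLoopSW, pvLoopSW, if_pos ⟨by omega, h⟩, if_pos ⟨by omega, h⟩]
      have hp : ((r - 1) * 8 + f).toNat + 8 = (r * 8 + f).toNat := by omega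
      have hacc1 : Int.lor ((256 * m : Nat) : Int) ((1 : Int) <<< (r * 8 + f).toNat) =
          ((256 * (m ||| 1 <<< ((r - 1) * 8 + f).toNat) : Nat) : Int) := by
        rw [pvone_shift_cast, pvlor_cast, pvNat_mul_lor, hp]
      have hacc2 : Int.lor (m : Int) ((1 : Int) <<< ((r - 1) * 8 + f).toNat) =
          (((m ||| 1 <<< ((r - 1) * 8 + f).toNat) : Nat) : Int) := by
        rw [pvone_shift_cast, pvlor_cast]
      rw [hacc1, hacc2, ih (r - 1) (f - 1) _ (by omega)]
    · rw [pvLoopSW, pvLoopSW, if_neg (fun hc => absurd hc.2 h), if_neg (fun hc => absurd hc.2 h)]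
      push_cast; ring

-- A's step rule above the board: adding a rank multiplies the mask by 2^8.
theorem pvA_shift (sq : Int) (h : 88 ≤ sq) : relevance_mask sq = 256 * relevance_mask (sq - 8) := by
  have hfd1 : PySem.Int.floordiv sq 8 = sq / 8 := PySem.Int.floordiv_eq_ediv_of_pos (by norm_num)
  have hmd1 : PySem.Int.mod sq 8 = sq % 8 := PySem.Int.mod_eq_emod_of_pos (by norm_num)
  have hfd2 : PySem.Int.floordiv (sq - 8) 8 = sq / 8 - 1 := by
    rw [PySem.Int.floordiv_eq_ediv_of_pos (by norm_num)]; omega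
  have hmd2 : PySem.Int.mod (sq - 8) 8 = sq % 8 := by
    rw [PySem.Int.mod_eq_emod_of_pos (by norm_num)]; omega
  simp only [relevance_mask, hfd1, hmd1, hfd2, hmd2]
  have hR : 11 ≤ sq / 8 := by omega
  have hF : 0 ≤ sq % 8 ∧ sq % 8 < 8 := ⟨by omega, by omega⟩
  rw [pvLoopNE_stop 7 _ _ _ (by omega), pvLoopNW_stop 7 _ _ _ (by omega),
      pvLoopNE_stop 7 _ _ _ (by omega), pvLoopNW_stop 7 _ _ _ (by omega)]
  obtain ⟨m', hm'⟩ := pvLoopSE_cast 8 (sq / 8 - 1 - 1) (sq % 8 + 1) 0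
  have hse := pvLoopSE_shift 8 (sq / 8 - 1) (sq % 8 + 1) 0 (by omega) (by omega)
  norm_num at hse hm'
  have hsw := pvLoopSW_shift 8 (sq / 8 - 1) (sq % 8 - 1) m' (by omega)
  push_cast at hsw
  rw [hse, hm', hsw]

-- B evaluated: the fold is the sum of the four ray terms.
theorem pvB_eval (sq : Int) : relevance_mask_alt sq =
    pvTerm sq 9 (min (6 - PySem.Int.floordiv sq 8) (6 - PySem.Int.mod sq 8)) +
    pvTerm sq 7 (min (6 - PySem.Int.floordiv sq 8) (PySem.Int.mod sq 8 - 1)) +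
    pvTerm sq (-7) (min (PySem.Int.floordiv sq 8 - 1) (6 - PySem.Int.mod sq 8)) +
    pvTerm sq (-9) (min (PySem.Int.floordiv sq 8 - 1) (PySem.Int.mod sq 8 - 1)) := by
  simp only [relevance_mask_alt, List.foldl, pvTerm]
  split_ifs <;> ring

theorem pvTerm_zero (sq step K : Int) (h : K < 1) : pvTerm sq step K = 0 := by
  rw [pvTerm, if_neg (by omega)]

theorem pvTerm_shift (sq step K : Int) (h : 8 ≤ sq + (if 0 < step then step else step * K)) :
    pvTerm sq step K = 256 * pvTerm (sq - 8) step K := by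
  by_cases hK : 1 ≤ K
  · rw [pvTerm, pvTerm, if_pos hK, if_pos hK]
    have hlo : (sq + (if 0 < step then step else step * K)).toNat
        = (sq - 8 + (if 0 < step then step else step * K)).toNat + 8 := by omega
    simp only [Int.shiftLeft_eq]
    rw [hlo, pow_add]
    ring
  · rw [pvTerm_zero _ _ _ (by omega), pvTerm_zero _ _ _ (by omega)]; ring

-- B's step rule above the board.
theorem pvB_shift (sq : Int) (h : 88 ≤ sq) : relevance_mask_alt sq = 256 * relevance_mask_alt (sq - 8) := by
  have hfd1 : PySem.Int.floordiv sq 8 = sq / 8 := PySem.Int.floordiv_eq_ediv_of_pos (by norm_num)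
  have hmd1 : PySem.Int.mod sq 8 = sq % 8 := PySem.Int.mod_eq_emod_of_pos (by norm_num)
  have hfd2 : PySem.Int.floordiv (sq - 8) 8 = sq / 8 - 1 := by
    rw [PySem.Int.floordiv_eq_ediv_of_pos (by norm_num)]; omega
  have hmd2 : PySem.Int.mod (sq - 8) 8 = sq % 8 := by
    rw [PySem.Int.mod_eq_emod_of_pos (by norm_num)]; omega
  rw [pvB_eval, pvB_eval, hfd1, hmd1, hfd2, hmd2]
  have hR : 11 ≤ sq / 8 := by omega
  have hF : 0 ≤ sq % 8 ∧ sq % 8 < 8 := ⟨by omega, by omega⟩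
  rw [pvTerm_zero sq 9 _ (by omega), pvTerm_zero sq 7 _ (by omega),
      pvTerm_zero (sq - 8) 9 _ (by omega), pvTerm_zero (sq - 8) 7 _ (by omega)]
  rw [show min (sq / 8 - 1) (6 - sq % 8) = 6 - sq % 8 by omega,
      show min (sq / 8 - 1) (sq % 8 - 1) = sq % 8 - 1 by omega,
      show min (sq / 8 - 1 - 1) (6 - sq % 8) = 6 - sq % 8 by omega,
      show min (sq / 8 - 1 - 1) (sq % 8 - 1) = sq % 8 - 1 by omega]
  rw [pvTerm_shift sq (-7) (6 - sq % 8) (by rw [if_neg (by omega)]; omega),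
      pvTerm_shift sq (-9) (sq % 8 - 1) (by rw [if_neg (by omega)]; omega)]
  ring

theorem pv_main (n : Nat) : relevance_mask ((n : Int) - 8) = relevance_mask_alt ((n : Int) - 8) := by
  induction n using Nat.strong_induction_on with
  | _ n ih =>
    by_cases h : n < 96
    · exact pv_base n (Finset.mem_range.mpr h)
    · have h8 : (((n - 8 : Nat) : Int) - 8) = ((n : Int) - 8) - 8 := by omega
      have hih := ih (n - 8) (by omega)
      rw [h8] at hih
      rw [pvA_shift _ (by omega), pvB_shift _ (by omega), hih]

-- ===== VERDICT (by name: the statement is the Claim_ definition above) =====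
theorem relevance_mask_spec : Claim_equal_relevance_mask := by
  intro sq _ hpre
  unfold Spec_relevance_mask
  have h : sq = (((sq + 8).toNat : Int)) - 8 := by unfold Pre_relevance_mask at hpre; omega
  rw [h]
  exact pv_main (sq + 8).toNat
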